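-- pv_equiv track=rewrite | github.com/John-Halo117/ARK | ark-core/forge/ui/common.py | _pipeline_line
-- ===== SOURCE A (Python) =====
-- def _pipeline_line(stage: str) -> str:
--     steps = [
--         "CLASSIFY",
--         "CONTEXT",
--         "PLAN",
--         "GENERATE",
--         "VERIFY",
--         "ATTACK",
--         "DECIDE",
--         "COMMIT",
--     ]
--     bucket = _pipeline_bucket(stage)
--     if bucket == "BLOCKED":
--         return " -> ".join([*steps, "[BLOCKED]"])
--     highlighted: list[str] = []
--     current_index = steps.index(bucket) if bucket in steps else -1
--     for index, step in enumerate(steps):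
--         if index < current_index:
--             highlighted.append(f"✓{step}")
--         elif index == current_index:
--             highlighted.append(f"[{step}]")
--         else:
--             highlighted.append(step)
--     return " -> ".join(highlighted)
--
-- def _pipeline_bucket(stage: str) -> str:
--     mapping = {
--         "idle": "CLASSIFY",
--         "queued": "CLASSIFY",
--         "classify_start": "CLASSIFY",
--         "runtime_check": "CLASSIFY",
--         "context": "CONTEXT",
--         "control": "PLAN",
--         "planner": "PLAN",
--         "baseline": "GENERATE",
--         "generate": "GENERATE",
--         "generated": "GENERATE",
--         "candidate_proposed": "GENERATE",
--         "candidate_start": "VERIFY",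
--         "candidate_apply": "VERIFY",
--         "candidate_invalid": "VERIFY",
--         "candidate_tests": "VERIFY",
--         "candidate_lint": "VERIFY",
--         "candidate_types": "VERIFY",
--         "candidate_gate": "ATTACK",
--         "candidate_attack": "ATTACK",
--         "candidate_synth": "ATTACK",
--         "candidate_done": "DECIDE",
--         "decision": "DECIDE",
--         "apply": "COMMIT",
--         "complete": "COMMIT",
--         "blocked": "BLOCKED",
--     }
--     return mapping.get(stage, "CLASSIFY")
-- ===== SOURCE B (Python) =====
-- # The pipeline is fixed, so the rendered line depends only on the bucket (9 cases).
-- # Precompute all nine lines once as a literal table; each call is a pure table lookup.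
--
-- _MAPPING = {
--     "idle": "CLASSIFY",
--     "queued": "CLASSIFY",
--     "classify_start": "CLASSIFY",
--     "runtime_check": "CLASSIFY",
--     "context": "CONTEXT",
--     "control": "PLAN",
--     "planner": "PLAN",
--     "baseline": "GENERATE",
--     "generate": "GENERATE",
--     "generated": "GENERATE",
--     "candidate_proposed": "GENERATE",
--     "candidate_start": "VERIFY",
--     "candidate_apply": "VERIFY",
--     "candidate_invalid": "VERIFY",
--     "candidate_tests": "VERIFY",
--     "candidate_lint": "VERIFY",
--     "candidate_types": "VERIFY",
--     "candidate_gate": "ATTACK",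
--     "candidate_attack": "ATTACK",
--     "candidate_synth": "ATTACK",
--     "candidate_done": "DECIDE",
--     "decision": "DECIDE",
--     "apply": "COMMIT",
--     "complete": "COMMIT",
--     "blocked": "BLOCKED",
-- }
--
-- _LINE_FOR_BUCKET = {
--     "CLASSIFY": "[CLASSIFY] -> CONTEXT -> PLAN -> GENERATE -> VERIFY -> ATTACK -> DECIDE -> COMMIT",
--     "CONTEXT": "\u2713CLASSIFY -> [CONTEXT] -> PLAN -> GENERATE -> VERIFY -> ATTACK -> DECIDE -> COMMIT",
--     "PLAN": "\u2713CLASSIFY -> \u2713CONTEXT -> [PLAN] -> GENERATE -> VERIFY -> ATTACK -> DECIDE -> COMMIT",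
--     "GENERATE": "\u2713CLASSIFY -> \u2713CONTEXT -> \u2713PLAN -> [GENERATE] -> VERIFY -> ATTACK -> DECIDE -> COMMIT",
--     "VERIFY": "\u2713CLASSIFY -> \u2713CONTEXT -> \u2713PLAN -> \u2713GENERATE -> [VERIFY] -> ATTACK -> DECIDE -> COMMIT",
--     "ATTACK": "\u2713CLASSIFY -> \u2713CONTEXT -> \u2713PLAN -> \u2713GENERATE -> \u2713VERIFY -> [ATTACK] -> DECIDE -> COMMIT",
--     "DECIDE": "\u2713CLASSIFY -> \u2713CONTEXT -> \u2713PLAN -> \u2713GENERATE -> \u2713VERIFY -> \u2713ATTACK -> [DECIDE] -> COMMIT",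
--     "COMMIT": "\u2713CLASSIFY -> \u2713CONTEXT -> \u2713PLAN -> \u2713GENERATE -> \u2713VERIFY -> \u2713ATTACK -> \u2713DECIDE -> [COMMIT]",
--     "BLOCKED": "CLASSIFY -> CONTEXT -> PLAN -> GENERATE -> VERIFY -> ATTACK -> DECIDE -> COMMIT -> [BLOCKED]",
-- }
--
--
-- def _pipeline_line(stage: str) -> str:
--     # every value of _MAPPING (and the default) is a key of _LINE_FOR_BUCKET
--     return _LINE_FOR_BUCKET[_MAPPING.get(stage, "CLASSIFY")]
-- ===== Notes on version B (the rewrite author's own statement) =====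
-- stated objective: alternative
-- what changed: The pipeline is a fixed 8-step list, so the output depends only on the bucket: B replaces A's per-call enumerate loop, list building and join with a precomputed literal bucket-to-line table, making each call a pure double dictionary lookup with no string assembly.
import Mathlib
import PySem

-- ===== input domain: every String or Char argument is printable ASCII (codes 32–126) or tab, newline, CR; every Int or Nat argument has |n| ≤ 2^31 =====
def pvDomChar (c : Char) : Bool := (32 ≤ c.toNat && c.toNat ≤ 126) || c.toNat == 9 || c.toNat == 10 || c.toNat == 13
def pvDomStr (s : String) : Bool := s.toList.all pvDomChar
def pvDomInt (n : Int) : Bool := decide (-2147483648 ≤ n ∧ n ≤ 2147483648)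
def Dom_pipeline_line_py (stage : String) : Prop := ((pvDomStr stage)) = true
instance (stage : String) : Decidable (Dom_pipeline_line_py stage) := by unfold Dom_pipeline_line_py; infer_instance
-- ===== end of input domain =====

-- B replaces A's per-call annotate-and-join loop by a precomputed literal bucket→line
-- table (the step list is fixed, so only 9 lines exist); each call is a table lookup.

-- ===== PORT A =====
-- helper: Python _pipeline_bucket (dict literal + .get with default)
def pipeline_bucket_py (stage : String) : String :=
  let mapping : PySem.Dict String String := PySem.Dict.ofList
    [("idle", "CLASSIFY"), ("queued", "CLASSIFY"), ("classify_start", "CLASSIFY"),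
     ("runtime_check", "CLASSIFY"), ("context", "CONTEXT"), ("control", "PLAN"),
     ("planner", "PLAN"), ("baseline", "GENERATE"), ("generate", "GENERATE"),
     ("generated", "GENERATE"), ("candidate_proposed", "GENERATE"),
     ("candidate_start", "VERIFY"), ("candidate_apply", "VERIFY"),
     ("candidate_invalid", "VERIFY"), ("candidate_tests", "VERIFY"),
     ("candidate_lint", "VERIFY"), ("candidate_types", "VERIFY"),
     ("candidate_gate", "ATTACK"), ("candidate_attack", "ATTACK"),
     ("candidate_synth", "ATTACK"), ("candidate_done", "DECIDE"),
     ("decision", "DECIDE"), ("apply", "COMMIT"), ("complete", "COMMIT"),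
     ("blocked", "BLOCKED")]
  mapping.getD stage "CLASSIFY"

def pipeline_line_py (stage : String) : String :=
  let steps : List String :=
    ["CLASSIFY", "CONTEXT", "PLAN", "GENERATE", "VERIFY", "ATTACK", "DECIDE", "COMMIT"]
  let bucket := pipeline_bucket_py stage
  if bucket == "BLOCKED" then
    PySem.Str.join " -> " (steps ++ ["[BLOCKED]"])
  else
    -- 'steps.index(bucket) if bucket in steps else -1'
    let currentIndex : Int :=
      if steps.contains bucket then
        match PySem.List.index? steps bucket with
        | some k => (k : Int)
        | none => -1     -- dead: index? is some exactly when bucket ∈ steps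
      else -1
    let highlighted : List String :=
      (PySem.List.enumerate steps).foldl (fun acc p =>
        if p.1 < currentIndex then acc ++ ["✓" ++ p.2]
        else if p.1 == currentIndex then acc ++ ["[" ++ p.2 ++ "]"]
        else acc ++ [p.2]) []
    PySem.Str.join " -> " highlighted

-- ===== PORT B =====
def pipelineMapping_alt : PySem.Dict String String := PySem.Dict.ofList
  [("idle", "CLASSIFY"), ("queued", "CLASSIFY"), ("classify_start", "CLASSIFY"),
   ("runtime_check", "CLASSIFY"), ("context", "CONTEXT"), ("control", "PLAN"),
   ("planner", "PLAN"), ("baseline", "GENERATE"), ("generate", "GENERATE"),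
   ("generated", "GENERATE"), ("candidate_proposed", "GENERATE"),
   ("candidate_start", "VERIFY"), ("candidate_apply", "VERIFY"),
   ("candidate_invalid", "VERIFY"), ("candidate_tests", "VERIFY"),
   ("candidate_lint", "VERIFY"), ("candidate_types", "VERIFY"),
   ("candidate_gate", "ATTACK"), ("candidate_attack", "ATTACK"),
   ("candidate_synth", "ATTACK"), ("candidate_done", "DECIDE"),
   ("decision", "DECIDE"), ("apply", "COMMIT"), ("complete", "COMMIT"),
   ("blocked", "BLOCKED")]

-- the precomputed literal bucket→line table (_LINE_FOR_BUCKET)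
def pipelineLineTable_alt : PySem.Dict String String := PySem.Dict.ofList
  [("CLASSIFY", "[CLASSIFY] -> CONTEXT -> PLAN -> GENERATE -> VERIFY -> ATTACK -> DECIDE -> COMMIT"),
   ("CONTEXT", "✓CLASSIFY -> [CONTEXT] -> PLAN -> GENERATE -> VERIFY -> ATTACK -> DECIDE -> COMMIT"),
   ("PLAN", "✓CLASSIFY -> ✓CONTEXT -> [PLAN] -> GENERATE -> VERIFY -> ATTACK -> DECIDE -> COMMIT"),
   ("GENERATE", "✓CLASSIFY -> ✓CONTEXT -> ✓PLAN -> [GENERATE] -> VERIFY -> ATTACK -> DECIDE -> COMMIT"),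
   ("VERIFY", "✓CLASSIFY -> ✓CONTEXT -> ✓PLAN -> ✓GENERATE -> [VERIFY] -> ATTACK -> DECIDE -> COMMIT"),
   ("ATTACK", "✓CLASSIFY -> ✓CONTEXT -> ✓PLAN -> ✓GENERATE -> ✓VERIFY -> [ATTACK] -> DECIDE -> COMMIT"),
   ("DECIDE", "✓CLASSIFY -> ✓CONTEXT -> ✓PLAN -> ✓GENERATE -> ✓VERIFY -> ✓ATTACK -> [DECIDE] -> COMMIT"),
   ("COMMIT", "✓CLASSIFY -> ✓CONTEXT -> ✓PLAN -> ✓GENERATE -> ✓VERIFY -> ✓ATTACK -> ✓DECIDE -> [COMMIT]"),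
   ("BLOCKED", "CLASSIFY -> CONTEXT -> PLAN -> GENERATE -> VERIFY -> ATTACK -> DECIDE -> COMMIT -> [BLOCKED]")]

def pipeline_line_py_alt (stage : String) : String :=
  -- '_LINE_FOR_BUCKET[bucket]': the key is always present (every mapping value and
  -- the default are keys of the table), so Python's dict indexing never raises;
  -- the getD "" default is unreachable.
  (pipelineLineTable_alt.get? (pipelineMapping_alt.getD stage "CLASSIFY")).getD ""

-- ===== PRECONDITION & SPEC =====
def Spec_pipeline_line_py (stage : String) (out : String) : Prop := out = pipeline_line_py_alt stage
instance (stage : String) (out : String) : Decidable (Spec_pipeline_line_py stage out) := by unfold Spec_pipeline_line_py; infer_instance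

-- ===== CLAIM =====
def Claim_equal_pipeline_line_py : Prop := ∀ (stage : String), Dom_pipeline_line_py stage → Spec_pipeline_line_py stage (pipeline_line_py stage)

-- ===== LEMMAS AND PROOFS =====

-- the keys of the stage→bucket mapping (proof helper only)
def pipelineKeys : List String :=
  ["idle", "queued", "classify_start", "runtime_check", "context", "control", "planner",
   "baseline", "generate", "generated", "candidate_proposed", "candidate_start",
   "candidate_apply", "candidate_invalid", "candidate_tests", "candidate_lint",
   "candidate_types", "candidate_gate", "candidate_attack", "candidate_synth",
   "candidate_done", "decision", "apply", "complete", "blocked"]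

-- a stage that is not a key of the mapping falls back to the default bucket
theorem bucket_default (stage : String) (hk : stage ∉ pipelineKeys) :
    pipeline_bucket_py stage = "CLASSIFY" := by
  unfold pipeline_bucket_py
  rw [show (PySem.Dict.ofList
    [(("idle" : String), ("CLASSIFY" : String)), ("queued", "CLASSIFY"), ("classify_start", "CLASSIFY"),
     ("runtime_check", "CLASSIFY"), ("context", "CONTEXT"), ("control", "PLAN"),
     ("planner", "PLAN"), ("baseline", "GENERATE"), ("generate", "GENERATE"),
     ("generated", "GENERATE"), ("candidate_proposed", "GENERATE"),
     ("candidate_start", "VERIFY"), ("candidate_apply", "VERIFY"),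
     ("candidate_invalid", "VERIFY"), ("candidate_tests", "VERIFY"),
     ("candidate_lint", "VERIFY"), ("candidate_types", "VERIFY"),
     ("candidate_gate", "ATTACK"), ("candidate_attack", "ATTACK"),
     ("candidate_synth", "ATTACK"), ("candidate_done", "DECIDE"),
     ("decision", "DECIDE"), ("apply", "COMMIT"), ("complete", "COMMIT"),
     ("blocked", "BLOCKED")]) = PySem.Dict.mk
    [("idle", "CLASSIFY"), ("queued", "CLASSIFY"), ("classify_start", "CLASSIFY"),
     ("runtime_check", "CLASSIFY"), ("context", "CONTEXT"), ("control", "PLAN"),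
     ("planner", "PLAN"), ("baseline", "GENERATE"), ("generate", "GENERATE"),
     ("generated", "GENERATE"), ("candidate_proposed", "GENERATE"),
     ("candidate_start", "VERIFY"), ("candidate_apply", "VERIFY"),
     ("candidate_invalid", "VERIFY"), ("candidate_tests", "VERIFY"),
     ("candidate_lint", "VERIFY"), ("candidate_types", "VERIFY"),
     ("candidate_gate", "ATTACK"), ("candidate_attack", "ATTACK"),
     ("candidate_synth", "ATTACK"), ("candidate_done", "DECIDE"),
     ("decision", "DECIDE"), ("apply", "COMMIT"), ("complete", "COMMIT"),
     ("blocked", "BLOCKED")] from by decide]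
  rw [PySem.Dict.getD_eq_get?_getD]
  have hnone : (PySem.Dict.mk
    [(("idle" : String), ("CLASSIFY" : String)), ("queued", "CLASSIFY"), ("classify_start", "CLASSIFY"),
     ("runtime_check", "CLASSIFY"), ("context", "CONTEXT"), ("control", "PLAN"),
     ("planner", "PLAN"), ("baseline", "GENERATE"), ("generate", "GENERATE"),
     ("generated", "GENERATE"), ("candidate_proposed", "GENERATE"),
     ("candidate_start", "VERIFY"), ("candidate_apply", "VERIFY"),
     ("candidate_invalid", "VERIFY"), ("candidate_tests", "VERIFY"),
     ("candidate_lint", "VERIFY"), ("candidate_types", "VERIFY"),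
     ("candidate_gate", "ATTACK"), ("candidate_attack", "ATTACK"),
     ("candidate_synth", "ATTACK"), ("candidate_done", "DECIDE"),
     ("decision", "DECIDE"), ("apply", "COMMIT"), ("complete", "COMMIT"),
     ("blocked", "BLOCKED")]).get? stage = none := by
    rw [PySem.Dict.get?_eq_none_iff_not_mem_keys]
    simpa [PySem.Dict.keys, pipelineKeys] using hk
  rw [hnone]
  rfl

-- B's lookup written through the bucket, for the unknown-stage case
theorem alt_via_bucket (stage : String) :
    pipeline_line_py_alt stage =
      (pipelineLineTable_alt.get? (pipeline_bucket_py stage)).getD "" := rfl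

-- ===== VERDICT =====
set_option maxHeartbeats 4000000 in
theorem pipeline_line_py_spec : Claim_equal_pipeline_line_py := by
  intro stage _
  unfold Spec_pipeline_line_py
  by_cases hk : stage ∈ pipelineKeys
  · -- finitely many known stages: evaluate both programs
    fin_cases hk <;> decide
  · -- unknown stage: the bucket is the default "CLASSIFY" in both programs
    unfold pipeline_line_py
    rw [alt_via_bucket stage, bucket_default stage hk]
    decide
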